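-- pv_equiv track=rewrite | github.com/Pedro-Laredo/LECI | 1 ano/1 semestre/FP/26-12-23/remove_leading0.py | remover_leading0
-- ===== SOURCE A (Python) =====
-- def remover_leading0(string):
--     string = list(string)
--     i = 0
--     while i < len(string):
--         if string[i] == ".":
--             if i + 1 < len(string) and string[i + 1] == "0":
--                 string.pop(i + 1)
--                 i -= 1  # Reduzir o índice para reavaliar o próximo elemento
--         elif string[i] == "0":
--             if i + 1 < len(string) and string[i + 1] == "0":
--                 string.pop(i)
--                 i -= 1  # Reduzir o índice para reavaliar o próximo elemento
--         i += 1
--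
--     return ''.join(string)
-- ===== SOURCE B (Python) =====
-- def remover_leading0(string):
--     # One left-to-right pass: drop a zero char whenever the last kept char is a zero or a dot
--     out = []
--     for c in string:
--         if c == "0" and out and (out[-1] == "0" or out[-1] == "."):
--             continue
--         out.append(c)
--     return ''.join(out)
-- ===== Notes on version B (the rewrite author's own statement) =====
-- stated objective: faster
-- what changed: Replaced the index-rewinding while loop with quadratic list.pop shifts by a single left-to-right pass that drops a zero character whenever the previously kept character is a zero or a dot.
import Mathlib
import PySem

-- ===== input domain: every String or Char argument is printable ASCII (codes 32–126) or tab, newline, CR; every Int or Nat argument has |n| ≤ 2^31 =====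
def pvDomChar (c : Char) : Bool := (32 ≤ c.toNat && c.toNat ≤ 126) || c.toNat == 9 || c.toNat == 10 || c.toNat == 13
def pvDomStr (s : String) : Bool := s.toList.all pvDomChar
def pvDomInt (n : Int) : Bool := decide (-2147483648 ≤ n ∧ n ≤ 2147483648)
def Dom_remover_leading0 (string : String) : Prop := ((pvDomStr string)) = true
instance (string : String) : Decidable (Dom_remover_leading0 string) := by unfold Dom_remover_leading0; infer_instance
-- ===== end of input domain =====

-- B replaces A's index-rewinding while loop (with its quadratic pops) by one linear pass
-- that drops a zero character whenever the previously kept character is a zero or a dot;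
-- objective: faster (measured).

-- ===== PORT A =====
-- A's while loop: each iteration either pops an element (net i unchanged, since the
-- 'i -= 1' is immediately followed by 'i += 1') or advances i by one; transcribed as
-- well-founded recursion on the measure 2*|s| - i.
def loopA (s : List Char) (i : Nat) : List Char :=
  if h : i < s.length then
    if s[i] = '.' then
      if hn : i + 1 < s.length then
        if s[i + 1] = '0' then loopA (s.eraseIdx (i + 1)) i
        else loopA s (i + 1)
      else loopA s (i + 1)
    else if s[i] = '0' then
      if hn : i + 1 < s.length then
        if s[i + 1] = '0' then loopA (s.eraseIdx i) i
        else loopA s (i + 1)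
      else loopA s (i + 1)
    else loopA s (i + 1)
  else s
termination_by 2 * s.length - i
decreasing_by
  all_goals first
    | (simp [List.length_eraseIdx, hn]; omega)
    | (simp [List.length_eraseIdx, h]; omega)
    | omega

def remover_leading0 (string : String) : String := String.mk (loopA string.toList 0)

-- ===== PORT B =====
-- Source B's loop with its output list kept reversed as an accumulator; out[-1] is acc's
-- head, and flagOf is Source B's test 'out and (out[-1] == "0" or out[-1] == ".")'.
def flagOf (acc : List Char) : Bool :=
  match acc with
  | p :: _ => p = '0' || p = '.'
  | [] => false

def loopB : List Char → List Char → List Char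
  | [], acc => acc.reverse
  | c :: rest, acc =>
    if c = '0' && flagOf acc then loopB rest acc
    else loopB rest (c :: acc)

def remover_leading0_alt (string : String) : String := String.mk (loopB string.toList [])

-- ===== PRECONDITION & SPEC =====
def Spec_remover_leading0 (string : String) (out : String) : Prop := out = remover_leading0_alt string
instance (string : String) (out : String) : Decidable (Spec_remover_leading0 string out) := by unfold Spec_remover_leading0; infer_instance

-- ===== CLAIM (what is proved, stated in full; the proofs are below) =====
def Claim_equal_remover_leading0 : Prop := ∀ (string : String), Dom_remover_leading0 string → Spec_remover_leading0 string (remover_leading0 string)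

-- ===== LEMMAS AND PROOFS =====

-- Common reference function: g z s rewrites s, dropping a '0' exactly when the
-- previously kept character was '0' or '.' (z records that fact).
def g : Bool → List Char → List Char
  | _, [] => []
  | z, c :: r => if c = '0' ∧ z then g z r else c :: g (c = '0' || c = '.') r

theorem loopB_eq (s acc : List Char) : loopB s acc = acc.reverse ++ g (flagOf acc) s := by
  induction s generalizing acc with
  | nil => simp [loopB, g]
  | cons c r ih =>
    by_cases h0 : c = '0'
    · by_cases hf : flagOf acc = true
      · simp [loopB, h0, hf, ih, g]
      · simp only [loopB, h0, hf, Bool.and_eq_true, decide_true, Bool.true_and, if_neg hf, ih, g]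
        simp [flagOf, h0, hf]
    · simp only [loopB, g]
      have : (decide (c = '0') && flagOf acc) = false := by simp [h0]
      rw [if_neg (by simp [this, h0]), if_neg (by simp [h0]), ih]
      simp [flagOf]

def flagAt (s : List Char) (i : Nat) : Bool :=
  if i = 0 then false else (s.getD (i - 1) ' ' = '0' || s.getD (i - 1) ' ' = '.')

-- invariant of A's loop: the char just before position i (if any) does not force
-- the drop of a '0' standing at position i
def InvA (s : List Char) (i : Nat) : Prop :=
  i = 0 ∨ i ≥ s.length ∨ ¬ ((s.getD (i - 1) ' ' = '0' ∨ s.getD (i - 1) ' ' = '.') ∧ s.getD i ' ' = '0')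

theorem getD_eraseIdx_lt (s : List Char) (j k : Nat) (hk : k < j) :
    (s.eraseIdx j).getD k ' ' = s.getD k ' ' := by
  by_cases hj : j < s.length
  · rw [List.eraseIdx_eq_take_drop_succ, List.getD_eq_getElem?_getD, List.getD_eq_getElem?_getD,
        List.getElem?_append_left (by simp; omega)]
    simp [List.getElem?_take, hk]
  · rw [List.eraseIdx_of_length_le (Nat.le_of_not_lt hj)]

theorem getD_lt (s : List Char) (k : Nat) (hk : k < s.length) : s.getD k ' ' = s[k] := by
  simp [List.getD_eq_getElem?_getD, List.getElem?_eq_getElem hk]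

theorem flagAt_eraseIdx (s : List Char) (i j : Nat) (hij : i ≤ j) :
    flagAt (s.eraseIdx j) i = flagAt s i := by
  unfold flagAt
  by_cases h0 : i = 0
  · simp [h0]
  · rw [getD_eraseIdx_lt s j (i - 1) (by omega)]

theorem flagAt_succ (s : List Char) (i : Nat) (h : i < s.length) :
    flagAt s (i + 1) = (s[i] = '0' || s[i] = '.') := by
  unfold flagAt
  rw [if_neg (Nat.succ_ne_zero i), Nat.add_sub_cancel, getD_lt s i h]

theorem take_eraseIdx_le (s : List Char) (i j : Nat) (hij : i ≤ j) :
    (s.eraseIdx j).take i = s.take i := by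
  by_cases hj : j < s.length
  · rw [List.eraseIdx_eq_take_drop_succ, List.take_append_of_le_length (by simp; omega),
        List.take_take]
    congr 1; omega
  · rw [List.eraseIdx_of_length_le (Nat.le_of_not_lt hj)]

-- A's prev-flag is false when the current char is '0' (from the invariant)
theorem flagAt_false_of_inv (s : List Char) (i : Nat) (h : i < s.length)
    (hz0 : s[i] = '0') (hinv : InvA s i) : flagAt s i = false := by
  unfold flagAt
  by_cases h0 : i = 0
  · simp [h0]
  · rcases hinv with h0' | hge | hne
    · exact absurd h0' h0
    · omega
    · rw [if_neg h0]
      simp only [Bool.or_eq_false_iff, decide_eq_false_iff_not]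
      constructor <;> · intro hc; exact hne ⟨by tauto, by rw [getD_lt s i h]; exact hz0⟩

theorem loopA_eq (s : List Char) (i : Nat) (hinv : InvA s i) :
    loopA s i = s.take i ++ g (flagAt s i) (s.drop i) := by
  induction s, i using loopA.induct with
  | case8 s i h =>
    rw [loopA]
    simp only [dif_neg h]
    have hlen : s.length ≤ i := Nat.le_of_not_lt h
    rw [List.take_of_length_le hlen, List.drop_of_length_le hlen]
    simp [g]
  | case1 s i h hdot hn hz ih =>
    -- s[i] = '.', s[i+1] = '0': pop i+1, i unchanged
    rw [loopA]
    simp only [dif_pos h, if_pos hdot, dif_pos hn, if_pos hz]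
    have hinv' : InvA (s.eraseIdx (i + 1)) i := by
      unfold InvA at hinv ⊢
      rcases hinv with h0 | hge | hne
      · exact Or.inl h0
      · omega
      · refine Or.inr (Or.inr ?_)
        rw [getD_eraseIdx_lt s (i + 1) (i - 1) (by omega),
            getD_eraseIdx_lt s (i + 1) i (by omega)]
        exact hne
    rw [ih hinv', take_eraseIdx_le s i (i + 1) (by omega),
        flagAt_eraseIdx s i (i + 1) (by omega)]
    have hdropE : (s.eraseIdx (i + 1)).drop i = s[i] :: s.drop (i + 2) := by
      rw [List.eraseIdx_eq_take_drop_succ, List.drop_append_of_le_length (by simp; omega)]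
      have h1 : (s.take (i + 1)).drop i = [s[i]] := by
        have h2 : s.drop i = s[i] :: s.drop (i + 1) := List.drop_eq_getElem_cons h
        rw [List.drop_take, h2, show i + 1 - i = 1 from by omega,
            List.take_succ_cons, List.take_zero]
      simp [h1]
    have hdropS : s.drop i = s[i] :: s[i + 1] :: s.drop (i + 2) := by
      rw [List.drop_eq_getElem_cons h, List.drop_eq_getElem_cons hn]
    rw [hdropE, hdropS, hdot, hz]
    simp [g]
  | case2 s i h hdot hn hz ih =>
    -- s[i] = '.', s[i+1] ≠ '0': advance
    rw [loopA]
    simp only [dif_pos h, if_pos hdot, dif_pos hn, if_neg hz]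
    have hinv' : InvA s (i + 1) := by
      refine Or.inr (Or.inr ?_)
      intro ⟨_, hc⟩
      exact hz (by rw [← getD_lt s (i + 1) hn]; simpa using hc)
    rw [ih hinv', flagAt_succ s i h, List.take_succ_eq_append_getElem h,
        List.drop_eq_getElem_cons h, hdot]
    simp [g]
  | case3 s i h hdot hn ih =>
    -- s[i] = '.', no next: advance
    rw [loopA]
    simp only [dif_pos h, if_pos hdot, dif_neg hn]
    have hinv' : InvA s (i + 1) := Or.inr (Or.inl (by omega))
    rw [ih hinv', List.take_succ_eq_append_getElem h, List.drop_eq_getElem_cons h, hdot]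
    have hd : s.drop (i + 1) = [] := List.drop_of_length_le (by omega)
    simp [hd, g]
  | case4 s i h hdot hz0 hn hz ih =>
    -- s[i] = '0', s[i+1] = '0': pop i, i unchanged
    rw [loopA]
    simp only [dif_pos h, if_neg hdot, if_pos hz0, dif_pos hn, if_pos hz]
    have hprev : flagAt s i = false := flagAt_false_of_inv s i h hz0 hinv
    have hinv' : InvA (s.eraseIdx i) i := by
      unfold InvA
      by_cases h0 : i = 0
      · exact Or.inl h0
      · refine Or.inr (Or.inr ?_)
        rw [getD_eraseIdx_lt s i (i - 1) (by omega)]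
        intro ⟨hc, _⟩
        unfold flagAt at hprev
        rw [if_neg h0] at hprev
        simp only [Bool.or_eq_false_iff, decide_eq_false_iff_not] at hprev
        tauto
    rw [ih hinv', take_eraseIdx_le s i i (by omega), flagAt_eraseIdx s i i (by omega)]
    have hdropE : (s.eraseIdx i).drop i = s.drop (i + 1) := by
      rw [List.eraseIdx_eq_take_drop_succ, List.drop_append_of_le_length (by simp; omega)]
      simp
    have hdropS : s.drop i = s[i] :: s.drop (i + 1) := List.drop_eq_getElem_cons h
    have hdropS1 : s.drop (i + 1) = s[i + 1] :: s.drop (i + 2) := List.drop_eq_getElem_cons hn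
    rw [hdropE, hdropS, hdropS1, hprev, hz0, hz]
    simp [g]
  | case5 s i h hdot hz0 hn hz ih =>
    -- s[i] = '0', s[i+1] ≠ '0': advance
    rw [loopA]
    simp only [dif_pos h, if_neg hdot, if_pos hz0, dif_pos hn, if_neg hz]
    have hprev : flagAt s i = false := flagAt_false_of_inv s i h hz0 hinv
    have hinv' : InvA s (i + 1) := by
      refine Or.inr (Or.inr ?_)
      intro ⟨_, hc⟩
      exact hz (by rw [← getD_lt s (i + 1) hn]; simpa using hc)
    rw [ih hinv', flagAt_succ s i h, List.take_succ_eq_append_getElem h,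
        List.drop_eq_getElem_cons h, hprev, hz0]
    simp [g]
  | case6 s i h hdot hz0 hn ih =>
    -- s[i] = '0', no next: advance
    rw [loopA]
    simp only [dif_pos h, if_neg hdot, if_pos hz0, dif_neg hn]
    have hprev : flagAt s i = false := flagAt_false_of_inv s i h hz0 hinv
    have hinv' : InvA s (i + 1) := Or.inr (Or.inl (by omega))
    rw [ih hinv', List.take_succ_eq_append_getElem h, List.drop_eq_getElem_cons h, hprev, hz0]
    have hd : s.drop (i + 1) = [] := List.drop_of_length_le (by omega)
    simp [hd, g]
  | case7 s i h hdot hz0 ih =>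
    -- any other character: advance
    rw [loopA]
    simp only [dif_pos h, if_neg hdot, if_neg hz0]
    have hinv' : InvA s (i + 1) := by
      refine Or.inr (Or.inr ?_)
      intro ⟨hc, _⟩
      rw [Nat.add_sub_cancel, getD_lt s i h] at hc
      tauto
    rw [ih hinv', flagAt_succ s i h, List.take_succ_eq_append_getElem h,
        List.drop_eq_getElem_cons h, List.append_assoc]
    congr 1
    simp [g, hdot, hz0]

-- ===== VERDICT (by name: the statement is the Claim_ definition above) =====
theorem remover_leading0_spec : Claim_equal_remover_leading0 := by
  intro string _
  unfold Spec_remover_leading0 remover_leading0 remover_leading0_alt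
  rw [loopB_eq, loopA_eq string.toList 0 (Or.inl rfl)]
  simp [flagAt, flagOf]
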